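-- pv_equiv track=rewrite | github.com/HannanFamily/SmartSearch | python/search_engine.py | build_synonym_index
-- ===== SOURCE A (Python) =====
-- from typing import List, Dict, Any, Optional, Tuple
--
-- def build_synonym_index(mapping_data: List[Dict[str, str]]) -> Dict[str, List[str]]:
--     """Build synonym index from mapping data (equivalent to VBA BuildSynonymIndex)."""
--     synonym_index = {}
--
--     for mapping in mapping_data:
--         raw_term = mapping.get('RawTerm', '').strip().lower()
--         standard_term = mapping.get('StandardTerm', '').strip().lower()
--
--         if raw_term and standard_term:
--             if standard_term not in synonym_index:
--                 synonym_index[standard_term] = []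
--             if raw_term not in synonym_index[standard_term]:
--                 synonym_index[standard_term].append(raw_term)
--
--     return synonym_index
-- ===== SOURCE B (Python) =====
-- def build_synonym_index(mapping_data):
--     """Build synonym index by filter-then-group-by: normalise into a flat (standard, raw)
--     pair list, then build each key's dedup'd raw list from that list."""
--     pairs = []
--     for mapping in mapping_data:
--         raw = mapping.get('RawTerm', '').strip().lower()
--         std = mapping.get('StandardTerm', '').strip().lower()
--         if raw and std:
--             pairs.append((std, raw))
--     return {s: list(dict.fromkeys(r for s2, r in pairs if s2 == s))
--             for s in dict.fromkeys(s for s, _ in pairs)}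
-- ===== Notes on version B (the rewrite author's own statement) =====
-- stated objective: alternative
-- what changed: A builds the dict incrementally with a membership check guarding every append; B first flattens the input into a normalised (standard, raw) pair list and then groups: the keys are the dedup'd standard terms in first-seen order and each value is the dedup of that key's raw terms collected by a scan over the pair list.
import Mathlib
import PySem

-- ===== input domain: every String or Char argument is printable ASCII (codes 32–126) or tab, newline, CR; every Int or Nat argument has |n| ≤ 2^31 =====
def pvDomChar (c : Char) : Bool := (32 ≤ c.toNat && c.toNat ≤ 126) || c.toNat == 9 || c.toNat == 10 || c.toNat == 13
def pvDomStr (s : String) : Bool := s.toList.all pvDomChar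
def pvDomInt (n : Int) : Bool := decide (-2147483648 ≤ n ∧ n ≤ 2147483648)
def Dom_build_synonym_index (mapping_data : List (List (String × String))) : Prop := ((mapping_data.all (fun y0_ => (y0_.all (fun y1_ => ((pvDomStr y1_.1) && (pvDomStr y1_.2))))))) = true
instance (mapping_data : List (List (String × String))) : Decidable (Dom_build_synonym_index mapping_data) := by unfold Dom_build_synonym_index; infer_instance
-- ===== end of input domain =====

-- B replaces A's incremental guarded-append dict build by a filter-then-group-by
-- decomposition over a flat normalised pair list; same return value.

-- ===== PORT A =====
-- mapping.get('RawTerm'/'StandardTerm', '').strip().lower() (verbatim in both Pythons)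
def pvRawOf (m : List (String × String)) : String :=
  PySem.Str.lower (PySem.Str.strip ((PySem.Dict.ofList m).getD "RawTerm" ""))

def pvStdOf (m : List (String × String)) : String :=
  PySem.Str.lower (PySem.Str.strip ((PySem.Dict.ofList m).getD "StandardTerm" ""))

-- one iteration of A's loop: insert [] if the key is new, append only if the raw term is absent
def pvStepA (d : PySem.Dict String (List String)) (m : List (String × String)) :
    PySem.Dict String (List String) :=
  let raw := pvRawOf m
  let std := pvStdOf m
  if raw ≠ "" ∧ std ≠ "" then
    let d1 := if d.contains std then d else d.insert std []
    if (d1.getD std []).contains raw then d1 else d1.modify std [] (· ++ [raw])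
  else d

def build_synonym_index (mapping_data : List (List (String × String))) : List (String × List String) :=
  (mapping_data.foldl pvStepA PySem.Dict.empty).items

-- ===== PORT B =====
-- phase 1 of B: one normalised (standard, raw) pair, or nothing when a field is empty
def pvPairOf (m : List (String × String)) : Option (String × String) :=
  let raw := pvRawOf m
  let std := pvStdOf m
  if raw ≠ "" ∧ std ≠ "" then some (std, raw) else none

-- phase 2 of B: the dict comprehension — dedup'd keys, each value a dedup'd scan of the pair list
def build_synonym_index_alt (mapping_data : List (List (String × String))) : List (String × List String) :=
  let pairs := mapping_data.filterMap pvPairOf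
  (PySem.List.dedup (pairs.map Prod.fst)).map
    (fun s => (s, PySem.List.dedup ((pairs.filter (fun p => p.1 == s)).map Prod.snd)))

-- ===== PRECONDITION & SPEC =====
def Spec_build_synonym_index (mapping_data : List (List (String × String))) (out : List (String × List String)) : Prop := out = build_synonym_index_alt mapping_data
instance (mapping_data : List (List (String × String))) (out : List (String × List String)) : Decidable (Spec_build_synonym_index mapping_data out) := by unfold Spec_build_synonym_index; infer_instance

-- ===== CLAIM (what is proved, stated in full; the proofs are below) =====
def Claim_equal_build_synonym_index : Prop := ∀ (mapping_data : List (List (String × String))), Dom_build_synonym_index mapping_data → Spec_build_synonym_index mapping_data (build_synonym_index mapping_data)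

-- ===== LEMMAS AND PROOFS =====

-- dedup of an appended element
theorem pv_dedup_append_singleton {α : Type} [BEq α] [LawfulBEq α] (v : List α) (r : α) :
    PySem.List.dedup (v ++ [r]) =
      if r ∈ v then PySem.List.dedup v else PySem.List.dedup v ++ [r] := by
  rw [PySem.List.dedup_eq_ofList, PySem.Set.ofList_append, PySem.List.dedup_eq_ofList]
  by_cases h : r ∈ v
  · simp [PySem.Set.update, h]
  · simp [PySem.Set.update, h]

-- grouping view of a pair list: keys and per-key raw lists
def pvKeysOf (P : List (String × String)) : List String :=
  PySem.List.dedup (P.map Prod.fst)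

def pvValsOf (P : List (String × String)) (k : String) : List String :=
  PySem.List.dedup ((P.filter (fun p => p.1 == k)).map Prod.snd)

-- one A-iteration preserves the grouping invariant against the extended pair list
theorem pv_step_inv (dA : PySem.Dict String (List String)) (P : List (String × String))
    (m : List (String × String))
    (hk : dA.keys = pvKeysOf P) (hv : ∀ k, dA.getD k [] = pvValsOf P k) :
    (pvStepA dA m).keys = pvKeysOf (P ++ (pvPairOf m).toList) ∧
      ∀ k, (pvStepA dA m).getD k [] = pvValsOf (P ++ (pvPairOf m).toList) k := by
  unfold pvStepA pvPairOf
  by_cases hc : pvRawOf m ≠ "" ∧ pvStdOf m ≠ ""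
  · simp only [if_pos hc, Option.toList_some]
    set raw := pvRawOf m
    set std := pvStdOf m
    have hkeys' : pvKeysOf (P ++ [(std, raw)]) =
        if std ∈ P.map Prod.fst then pvKeysOf P else pvKeysOf P ++ [std] := by
      unfold pvKeysOf
      rw [List.map_append, List.map_cons, List.map_nil, pv_dedup_append_singleton]
    have hvals' : ∀ k, pvValsOf (P ++ [(std, raw)]) k =
        if std = k then
          (if raw ∈ (P.filter (fun p => p.1 == k)).map Prod.snd
           then pvValsOf P k else pvValsOf P k ++ [raw])
        else pvValsOf P k := by
      intro k
      unfold pvValsOf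
      rw [List.filter_append]
      by_cases hks : std = k
      · simp only [if_pos hks, List.filter_cons, List.filter_nil]
        rw [if_pos (by simpa using hks)]
        rw [List.map_append, List.map_cons, List.map_nil, pv_dedup_append_singleton]
      · simp only [if_neg hks, List.filter_cons, List.filter_nil]
        rw [if_neg (by simpa using hks)]
        simp
    have hmemkeys : dA.contains std = decide (std ∈ P.map Prod.fst) := by
      rw [PySem.Dict.contains_eq_decide_mem_keys, hk]
      unfold pvKeysOf
      simp
    by_cases hs : std ∈ P.map Prod.fst
    · -- key already present
      have hcA : dA.contains std = true := by rw [hmemkeys]; simpa using hs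
      simp only [hcA, if_true]
      have hraws : (dA.getD std []).contains raw =
          decide (raw ∈ (P.filter (fun p => p.1 == std)).map Prod.snd) := by
        rw [hv std]
        unfold pvValsOf
        simp
      by_cases hr : raw ∈ (P.filter (fun p => p.1 == std)).map Prod.snd
      · rw [if_pos (by rw [hraws]; simpa using hr)]
        refine ⟨by rw [hk, hkeys', if_pos hs], fun k => ?_⟩
        rw [hvals' k, hv k]
        by_cases hks : std = k
        · subst hks; rw [if_pos rfl, if_pos hr]
        · rw [if_neg hks]
      · rw [if_neg (by rw [hraws]; simpa using hr)]
        constructor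
        · rw [PySem.Dict.keys_modify, PySem.Dict.keys_insert_of_contains dA _ hcA,
              hk, hkeys', if_pos hs]
        · intro k
          rw [PySem.Dict.getD_modify, hvals' k]
          by_cases hks : std = k
          · subst hks
            rw [if_pos rfl, if_pos rfl, if_neg hr, hv std]
          · rw [if_neg hks, if_neg (fun h => hks h.symm), hv k]
    · -- fresh key
      have hcA : dA.contains std = false := by rw [hmemkeys]; simpa using hs
      have hfilter : P.filter (fun p => p.1 == std) = [] := by
        rw [List.filter_eq_nil_iff]
        intro p hp hps
        exact hs (List.mem_map.mpr ⟨p, hp, by simpa using hps⟩)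
      simp only [hcA, Bool.false_eq_true, if_false]
      have hg1 : (dA.insert std []).getD std [] = ([] : List String) := by
        rw [PySem.Dict.getD_insert, if_pos rfl]
      rw [hg1, if_neg (by simp)]
      constructor
      · rw [PySem.Dict.keys_modify,
            PySem.Dict.keys_insert_of_contains _ _ (PySem.Dict.contains_insert_self dA std []),
            PySem.Dict.keys_insert_of_not_contains dA [] hcA, hk, hkeys', if_neg hs]
      · intro k
        rw [PySem.Dict.getD_modify, hvals' k]
        by_cases hks : std = k
        · subst hks
          rw [if_pos rfl, if_pos rfl, hg1, if_neg (by rw [hfilter]; simp)]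
          unfold pvValsOf
          rw [hfilter]
          rfl
        · rw [if_neg hks, if_neg (fun h => hks h.symm), PySem.Dict.getD_insert,
              if_neg (fun h => hks h.symm), hv k]
  · simp only [if_neg hc, Option.toList_none, List.append_nil]
    exact ⟨hk, hv⟩

-- the whole fold satisfies the grouping invariant for the filterMap'd pair list
theorem pv_fold_inv (l : List (List (String × String)))
    (dA : PySem.Dict String (List String)) (P : List (String × String))
    (hk : dA.keys = pvKeysOf P) (hv : ∀ k, dA.getD k [] = pvValsOf P k) :
    (l.foldl pvStepA dA).keys = pvKeysOf (P ++ l.filterMap pvPairOf) ∧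
      ∀ k, (l.foldl pvStepA dA).getD k [] = pvValsOf (P ++ l.filterMap pvPairOf) k := by
  induction l generalizing dA P with
  | nil => simpa using ⟨hk, hv⟩
  | cons m t ih =>
    simp only [List.foldl_cons, List.filterMap_cons]
    obtain ⟨h1, h2⟩ := pv_step_inv dA P m hk hv
    have := ih (pvStepA dA m) (P ++ (pvPairOf m).toList) h1 h2
    cases hpm : pvPairOf m with
    | none => simpa [hpm] using this
    | some p => simpa [hpm] using this

-- ===== VERDICT (by name: the statement is the Claim_ definition above) =====
theorem build_synonym_index_spec : Claim_equal_build_synonym_index := by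
  intro md _
  unfold Spec_build_synonym_index build_synonym_index build_synonym_index_alt
  obtain ⟨hk, hv⟩ := pv_fold_inv md PySem.Dict.empty []
    (by rw [PySem.Dict.keys_empty]; rfl)
    (fun k => by rw [PySem.Dict.getD_empty]; rfl)
  simp only [List.nil_append] at hk hv
  have hnd : (md.foldl pvStepA PySem.Dict.empty).keys.Nodup := by
    rw [hk]; exact PySem.List.nodup_dedup _
  rw [PySem.Dict.items_eq_map_keys _ hnd ([] : List String), hk]
  exact List.map_congr_left (fun k _ => by rw [hv k]; rfl)
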